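-- pv_equiv track=rewrite | github.com/nico-fernandez/parser-py | Terminals/PAROPEN.py | PAROPEN_automata
-- ===== SOURCE A (Python) =====
-- TRAP_STATE = -1
--
-- RESULT_TRAP = "RESULT_TRAP"
--
-- RESULT_ACCEPTED = "ACCEPTED"
--
-- RESULT_NOT_ACCEPTED = "NOT ACCEPTED"
--
-- def PAROPEN_delta(state, character):
--     if state == 0 and character == "(":
--         return 1
--     return TRAP_STATE
--
-- def PAROPEN_automata(string):
--     finals = [1]
--     state = 0
--
--     for character in string:
--         next_state = PAROPEN_delta(state, character)
--         state = next_state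
--
--     if state in finals:
--         return RESULT_ACCEPTED
--     if state == TRAP_STATE:
--         return RESULT_TRAP
--     return RESULT_NOT_ACCEPTED
-- ===== SOURCE B (Python) =====
-- RESULT_TRAP = "RESULT_TRAP"
-- RESULT_ACCEPTED = "ACCEPTED"
-- RESULT_NOT_ACCEPTED = "NOT ACCEPTED"
--
-- def PAROPEN_automata(string):
--     items = list(string)
--     if not items:
--         return RESULT_NOT_ACCEPTED
--     if items == ["("]:
--         return RESULT_ACCEPTED
--     return RESULT_TRAP
-- ===== Notes on version B (the rewrite author's own statement) =====
-- stated objective: simpler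
-- what changed: Replaced the per-character delta-function state machine with a direct three-way case analysis on the materialized character list (empty / exactly ["("] / anything else), removing the per-character Python loop and delta calls.
import Mathlib
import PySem

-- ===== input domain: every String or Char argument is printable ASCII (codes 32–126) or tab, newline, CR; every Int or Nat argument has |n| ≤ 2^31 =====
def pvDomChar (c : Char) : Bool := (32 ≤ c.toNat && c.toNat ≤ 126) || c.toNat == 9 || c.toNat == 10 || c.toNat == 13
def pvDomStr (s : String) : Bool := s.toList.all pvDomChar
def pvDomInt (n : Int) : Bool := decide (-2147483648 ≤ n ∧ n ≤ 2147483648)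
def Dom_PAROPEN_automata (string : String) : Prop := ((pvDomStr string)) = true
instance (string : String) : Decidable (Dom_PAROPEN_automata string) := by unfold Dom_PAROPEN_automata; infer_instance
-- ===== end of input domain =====

-- B replaces A's per-character delta-function state machine with a direct three-way
-- case analysis on the character list (objective: simpler); same result on every input.

-- ===== PORT A =====
def PAROPEN_delta (state : Int) (character : Char) : Int :=
  if state == 0 && character == '(' then 1 else (-1)

def PAROPEN_automata (string : String) : String :=
  let finals : List Int := [1]
  let state : Int :=
    string.toList.foldl (fun state character => PAROPEN_delta state character) 0
  if state ∈ finals then "ACCEPTED"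
  else if state == -1 then "RESULT_TRAP"
  else "NOT ACCEPTED"

-- ===== PORT B =====
def PAROPEN_automata_alt (string : String) : String :=
  let items := string.toList
  if items = [] then "NOT ACCEPTED"
  else if items = ['('] then "ACCEPTED"
  else "RESULT_TRAP"

-- ===== PRECONDITION & SPEC =====
def Spec_PAROPEN_automata (string : String) (out : String) : Prop := out = PAROPEN_automata_alt string
instance (string : String) (out : String) : Decidable (Spec_PAROPEN_automata string out) := by unfold Spec_PAROPEN_automata; infer_instance

-- ===== CLAIM (what is proved, stated in full; the proofs are below) =====
def Claim_equal_PAROPEN_automata : Prop := ∀ (string : String), Dom_PAROPEN_automata string → Spec_PAROPEN_automata string (PAROPEN_automata string)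

-- ===== LEMMAS AND PROOFS =====

-- once in the trap state, the fold stays there
theorem paropen_foldl_trap (l : List Char) :
    l.foldl (fun state character => PAROPEN_delta state character) (-1) = -1 := by
  induction l with
  | nil => rfl
  | cons c cs ih =>
    rw [List.foldl_cons]
    have hd : PAROPEN_delta (-1) c = -1 := by simp [PAROPEN_delta]
    rw [hd]; exact ih

-- closed-form characterisation of A's state-machine run
theorem paropen_run (l : List Char) :
    l.foldl (fun state character => PAROPEN_delta state character) 0 =
      if l = [] then 0 else if l = ['('] then 1 else -1 := by
  cases l with
  | nil => rfl
  | cons c cs =>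
    rw [List.foldl_cons]
    by_cases hc : c = '('
    · subst hc
      have hd : PAROPEN_delta 0 '(' = 1 := by simp [PAROPEN_delta]
      rw [hd]
      cases cs with
      | nil => simp
      | cons d ds =>
        rw [List.foldl_cons]
        have hd2 : PAROPEN_delta 1 d = -1 := by simp [PAROPEN_delta]
        rw [hd2, paropen_foldl_trap]
        simp
    · have hd : PAROPEN_delta 0 c = -1 := by simp [PAROPEN_delta, hc]
      rw [hd, paropen_foldl_trap]
      simp [hc]

-- ===== VERDICT (by name: the statement is the Claim_ definition above) =====
theorem PAROPEN_automata_spec : Claim_equal_PAROPEN_automata := by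
  intro s _
  unfold Spec_PAROPEN_automata PAROPEN_automata PAROPEN_automata_alt
  rw [paropen_run]
  by_cases h0 : s.toList = []
  · simp [h0]
  · by_cases h1 : s.toList = ['(']
    · simp [h0, h1]
    · simp [h0, h1]
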